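-- pv_equiv track=rewrite | github.com/princewu/sinohealth | 医疗机构采集/untitled5.py | rebuild_dic
-- ===== SOURCE A (Python) =====
-- def rebuild_dic( dic):
--     '''
--     重构字典，按照字典词的字数重构
--     Parameters
--     ----------
--     dic : dict
--         原词典
--     Returns
--     -------
--     child_dic : dict
--         按词的字数重新整理的词典
--     '''
--     child_dic = {}
--     for k,v in dic.items():
--         word_len = len(k)
--         if word_len not in child_dic.keys():
--             child_dic[word_len] = {}
--         child_dic[word_len][k] = v
--     return child_dic
-- ===== SOURCE B (Python) =====
-- def rebuild_dic(dic):
--     '''Regroup dict entries by key length: first-occurrence-ordered lengths, then one filtered pass per length.'''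
--     lengths = list(dict.fromkeys(len(k) for k in dic))
--     return {L: {k: v for k, v in dic.items() if len(k) == L} for L in lengths}
-- ===== Notes on version B (the rewrite author's own statement) =====
-- stated objective: simpler
-- what changed: A builds the nested dict in a single accumulating pass with membership checks; B first collects the distinct key lengths in first-occurrence order and then builds each group by a filtered comprehension over the items (nested passes, no mutation).
import Mathlib
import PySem

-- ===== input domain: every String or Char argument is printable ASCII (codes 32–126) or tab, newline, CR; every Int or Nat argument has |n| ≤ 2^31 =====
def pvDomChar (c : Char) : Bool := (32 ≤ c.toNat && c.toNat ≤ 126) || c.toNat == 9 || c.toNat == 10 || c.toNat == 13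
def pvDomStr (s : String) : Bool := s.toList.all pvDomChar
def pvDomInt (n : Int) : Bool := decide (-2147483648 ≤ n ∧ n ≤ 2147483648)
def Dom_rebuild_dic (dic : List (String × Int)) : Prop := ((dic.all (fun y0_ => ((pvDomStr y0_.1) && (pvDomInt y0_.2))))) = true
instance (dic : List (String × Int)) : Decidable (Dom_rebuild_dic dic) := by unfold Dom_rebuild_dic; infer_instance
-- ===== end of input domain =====

-- B replaces A's single accumulating pass over the items by a first-occurrence-ordered
-- list of distinct key lengths plus one filtered pass per length (simpler decomposition, no mutation).


-- ===== PORT A =====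
-- the loop body: 'if word_len not in child_dic.keys(): child_dic[word_len] = {}; child_dic[word_len][k] = v'
def rebuildStep (child : PySem.Dict Int (PySem.Dict String Int)) (kv : String × Int) :
    PySem.Dict Int (PySem.Dict String Int) :=
  let wordLen : Int := (PySem.Str.len kv.1 : Int)
  let child := if child.contains wordLen then child else child.insert wordLen PySem.Dict.empty
  child.insert wordLen ((child.getD wordLen PySem.Dict.empty).insert kv.1 kv.2)

def rebuild_dic (dic : List (String × Int)) : List (Int × List (String × Int)) :=
  (dic.foldl rebuildStep PySem.Dict.empty).items.map (fun p => (p.1, p.2.items))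

-- ===== PORT B =====
def rebuild_dic_alt (dic : List (String × Int)) : List (Int × List (String × Int)) :=
  (PySem.List.dedup (dic.map (fun kv => (PySem.Str.len kv.1 : Int)))).map
    (fun L => (L, dic.filter (fun kv => (PySem.Str.len kv.1 : Int) == L)))

-- ===== PRECONDITION & SPEC =====
-- Pre_: the association list stands for a Python dict, whose keys are necessarily distinct;
-- it excludes nothing of A's actual domain (A's argument is a dict).
def Pre_rebuild_dic (dic : List (String × Int)) : Prop := (dic.map Prod.fst).Nodup
instance (dic : List (String × Int)) : Decidable (Pre_rebuild_dic dic) := by unfold Pre_rebuild_dic; infer_instance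
def pvWitness_rebuild_dic : (List (String × Int)) := [("a", 1), ("bb", 2), ("c", 3)]

def Spec_rebuild_dic (dic : List (String × Int)) (out : List (Int × List (String × Int))) : Prop := out = rebuild_dic_alt dic
instance (dic : List (String × Int)) (out : List (Int × List (String × Int))) : Decidable (Spec_rebuild_dic dic out) := by unfold Spec_rebuild_dic; infer_instance

-- ===== CLAIM (what is proved, stated in full; the proofs are below) =====
def Claim_equal_rebuild_dic : Prop := ∀ (dic : List (String × Int)), Dom_rebuild_dic dic → Pre_rebuild_dic dic → Spec_rebuild_dic dic (rebuild_dic dic)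

-- ===== LEMMAS AND PROOFS =====

-- the key function of the grouping
def pvKey (kv : String × Int) : Int := (PySem.Str.len kv.1 : Int)

-- A's two-step update ('setdefault to {}' then 'child_dic[word_len][k] = v') is one Dict.modify
theorem rebuildStep_eq_modify (child : PySem.Dict Int (PySem.Dict String Int)) (kv : String × Int) :
    rebuildStep child kv = child.modify (pvKey kv) PySem.Dict.empty (fun d => d.insert kv.1 kv.2) := by
  unfold rebuildStep pvKey
  by_cases h : child.contains ((PySem.Str.len kv.1 : Int)) = true
  · simp only [h, if_true, PySem.Dict.modify]
  · have h' : child.contains ((PySem.Str.len kv.1 : Int)) = false := by simpa using h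
    simp only [h', Bool.false_eq_true, if_false, PySem.Dict.modify,
      PySem.Dict.insert_insert_self, PySem.Dict.getD_insert_self,
      PySem.Dict.getD_of_not_contains child _ h']

-- the grouping fold, read at one key L, is an insert-fold over the L-filtered items
theorem getD_foldl_modify_insert (l : List (String × Int))
    (d : PySem.Dict Int (PySem.Dict String Int)) (L : Int) :
    (l.foldl (fun d x => d.modify (pvKey x) PySem.Dict.empty (fun t => t.insert x.1 x.2)) d).getD L PySem.Dict.empty
      = (l.filter (fun x => pvKey x == L)).foldl (fun t x => t.insert x.1 x.2) (d.getD L PySem.Dict.empty) := by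
  induction l generalizing d with
  | nil => rfl
  | cons x xs ih =>
      simp only [List.foldl_cons, List.filter_cons]
      by_cases h : pvKey x = L
      · simp only [h, beq_self_eq_true, if_true, List.foldl_cons, ih,
          PySem.Dict.getD_modify_self]
      · have hb : (pvKey x == L) = false := by simpa using h
        rw [ih, PySem.Dict.getD_modify d (pvKey x) L PySem.Dict.empty]
        simp [hb, Ne.symm h]

-- an insert-fold over pairs with distinct keys lists exactly those pairs
theorem items_foldl_insert_of_nodup (l : List (String × Int)) (h : (l.map Prod.fst).Nodup) :
    (l.foldl (fun t x => t.insert x.1 x.2) (PySem.Dict.empty : PySem.Dict String Int)).items = l := by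
  have := PySem.Dict.items_foldl_insert_fresh (l := l) (k := Prod.fst) (v := Prod.snd)
    (d := PySem.Dict.empty) (by intro a _; simp) h
  simpa using this

theorem rebuild_dic_spec_aux (dic : List (String × Int)) (hnd : (dic.map Prod.fst).Nodup) :
    rebuild_dic dic = rebuild_dic_alt dic := by
  unfold rebuild_dic rebuild_dic_alt
  have hstep : rebuildStep = fun child kv =>
      PySem.Dict.modify child (pvKey kv) PySem.Dict.empty (fun d => d.insert kv.1 kv.2) := by
    funext child kv; exact rebuildStep_eq_modify child kv
  rw [hstep]
  have hkeys : (dic.foldl (fun child kv =>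
        PySem.Dict.modify child (pvKey kv) PySem.Dict.empty (fun d => d.insert kv.1 kv.2))
        PySem.Dict.empty).keys = PySem.List.dedup (dic.map pvKey) := by
    have hk := PySem.Dict.keys_foldl_modify_key (l := dic) (key := pvKey)
      (d0 := PySem.Dict.empty) (f := fun _ kv => fun t => t.insert kv.1 kv.2)
      (d := PySem.Dict.empty)
    simpa [PySem.Set.update_nil_left, PySem.Dict.keys] using hk
  have hnodupk : (dic.foldl (fun child kv =>
        PySem.Dict.modify child (pvKey kv) PySem.Dict.empty (fun d => d.insert kv.1 kv.2))
        PySem.Dict.empty).keys.Nodup := by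
    rw [hkeys]; exact PySem.List.nodup_dedup _
  rw [PySem.Dict.items_eq_map_keys _ hnodupk PySem.Dict.empty, hkeys, List.map_map]
  have hkey_eq : (fun kv : String × Int => (PySem.Str.len kv.1 : Int)) = pvKey := rfl
  rw [hkey_eq]
  apply List.map_congr_left
  intro L _
  simp only [Function.comp]
  refine congrArg (fun t => (L, t)) ?_
  rw [getD_foldl_modify_insert dic PySem.Dict.empty L]
  have he : (PySem.Dict.empty : PySem.Dict Int (PySem.Dict String Int)).getD L PySem.Dict.empty
      = PySem.Dict.empty := PySem.Dict.getD_empty _ _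
  rw [he]
  have hsub : ((dic.filter (fun x => pvKey x == L)).map Prod.fst).Nodup :=
    ((List.filter_sublist (l := dic) (p := fun x => pvKey x == L)).map Prod.fst).nodup hnd
  rw [items_foldl_insert_of_nodup _ hsub]
  rfl

-- ===== VERDICT (by name: the statement is the Claim_ definition above) =====
theorem rebuild_dic_spec : Claim_equal_rebuild_dic := by
  intro dic _ hpre
  unfold Spec_rebuild_dic
  exact rebuild_dic_spec_aux dic hpre
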